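-- pv_equiv track=rewrite | github.com/Kapilkapse777/Smart-Cargo-main | backend/utils/matching_engine.py | _are_cargo_types_compatible
-- ===== SOURCE A (Python) =====
-- def _are_cargo_types_compatible(type1, type2):
--     """Check if cargo types are compatible"""
--     compatible_groups = {
--         'electronics': ['electronics', 'gadgets', 'appliances'],
--         'textiles': ['textiles', 'clothing', 'fabrics'],
--         'machinery': ['machinery', 'equipment', 'industrial'],
--         'food': ['food', 'agriculture', 'perishables'],
--         'chemicals': ['chemicals', 'pharmaceuticals', 'industrial']
--     }
--
--     for group, types in compatible_groups.items():
--         if type1.lower() in types and type2.lower() in types: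
--             return True
--
--     return False
-- ===== SOURCE B (Python) =====
-- def _group_tags(t):
--     """Classify one lowered cargo-type token into the set of group tags it belongs to."""
--     if t in ('electronics', 'gadgets', 'appliances'):
--         return {'electronics'}
--     if t in ('textiles', 'clothing', 'fabrics'):
--         return {'textiles'}
--     if t in ('machinery', 'equipment'):
--         return {'machinery'}
--     if t == 'industrial':
--         return {'machinery', 'chemicals'}
--     if t in ('food', 'agriculture', 'perishables'):
--         return {'food'}
--     if t in ('chemicals', 'pharmaceuticals'):
--         return {'chemicals'}
--     return set()
--
--
-- def _are_cargo_types_compatible(type1, type2):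
--     """Check if cargo types are compatible: classify each token, intersect the tag sets."""
--     return bool(_group_tags(type1.lower()) & _group_tags(type2.lower()))
-- ===== Notes on version B (the rewrite author's own statement) =====
-- stated objective: alternative
-- what changed: A scans the groups table and tests both types' membership in every group's list; B drops the table and instead classifies each lowered token directly into its set of group tags via a per-token decision chain, then answers by intersecting the two tag sets.
import Mathlib
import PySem

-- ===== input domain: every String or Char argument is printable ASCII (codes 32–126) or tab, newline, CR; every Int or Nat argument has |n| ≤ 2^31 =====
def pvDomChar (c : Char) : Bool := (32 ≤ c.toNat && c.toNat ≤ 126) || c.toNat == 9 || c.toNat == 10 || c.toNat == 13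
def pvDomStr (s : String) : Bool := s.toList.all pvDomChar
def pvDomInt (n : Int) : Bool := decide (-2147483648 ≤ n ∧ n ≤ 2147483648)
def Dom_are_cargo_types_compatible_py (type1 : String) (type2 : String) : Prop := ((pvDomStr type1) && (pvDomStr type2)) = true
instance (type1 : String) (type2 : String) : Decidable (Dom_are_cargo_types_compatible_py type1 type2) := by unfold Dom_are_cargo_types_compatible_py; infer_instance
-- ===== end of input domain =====

-- B drops A's groups table and its group-by-group double-membership scan; instead it classifies
-- each lowered token directly into its set of group tags (a decision chain) and intersects the
-- two tag sets; objective: alternative, not faster.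

-- ===== PORT A =====
def pvGroupsA : PySem.Dict String (List String) :=
  PySem.Dict.ofList
    [("electronics", ["electronics", "gadgets", "appliances"]),
     ("textiles", ["textiles", "clothing", "fabrics"]),
     ("machinery", ["machinery", "equipment", "industrial"]),
     ("food", ["food", "agriculture", "perishables"]),
     ("chemicals", ["chemicals", "pharmaceuticals", "industrial"])]

-- the for-loop over items with an early 'return True' and a final 'return False' is 'any'
def are_cargo_types_compatible_py (type1 : String) (type2 : String) : Bool :=
  pvGroupsA.items.any (fun gt =>
    gt.2.contains (PySem.Str.lower type1) && gt.2.contains (PySem.Str.lower type2))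

-- ===== PORT B =====
-- Source B's _group_tags: an if/elif decision chain from one lowered token to its set of group tags
def pvGroupTags (t : String) : PySem.Set String :=
  if ["electronics", "gadgets", "appliances"].contains t then PySem.Set.ofList ["electronics"]
  else if ["textiles", "clothing", "fabrics"].contains t then PySem.Set.ofList ["textiles"]
  else if ["machinery", "equipment"].contains t then PySem.Set.ofList ["machinery"]
  else if t == "industrial" then PySem.Set.ofList ["machinery", "chemicals"]
  else if ["food", "agriculture", "perishables"].contains t then PySem.Set.ofList ["food"]
  else if ["chemicals", "pharmaceuticals"].contains t then PySem.Set.ofList ["chemicals"]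
  else PySem.Set.empty

-- bool(s & t) = the intersection is non-empty
def are_cargo_types_compatible_py_alt (type1 : String) (type2 : String) : Bool :=
  decide (0 < PySem.Set.len (PySem.Set.inter
    (pvGroupTags (PySem.Str.lower type1)) (pvGroupTags (PySem.Str.lower type2))))

-- ===== PRECONDITION & SPEC =====
def Spec_are_cargo_types_compatible_py (type1 : String) (type2 : String) (out : Bool) : Prop := out = are_cargo_types_compatible_py_alt type1 type2
instance (type1 : String) (type2 : String) (out : Bool) : Decidable (Spec_are_cargo_types_compatible_py type1 type2 out) := by unfold Spec_are_cargo_types_compatible_py; infer_instance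

-- ===== CLAIM (what is proved, stated in full; the proofs are below) =====
def Claim_equal_are_cargo_types_compatible_py : Prop := ∀ (type1 : String) (type2 : String), Dom_are_cargo_types_compatible_py type1 type2 → Spec_are_cargo_types_compatible_py type1 type2 (are_cargo_types_compatible_py type1 type2)

-- ===== LEMMAS AND PROOFS =====

-- "s is none of the 14 distinct tokens occurring in the groups"
def pvNotTok (a : String) : Prop :=
  a ≠ "electronics" ∧ a ≠ "gadgets" ∧ a ≠ "appliances" ∧ a ≠ "textiles" ∧
  a ≠ "clothing" ∧ a ≠ "fabrics" ∧ a ≠ "machinery" ∧ a ≠ "equipment" ∧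
  a ≠ "industrial" ∧ a ≠ "food" ∧ a ≠ "agriculture" ∧ a ≠ "perishables" ∧
  a ≠ "chemicals" ∧ a ≠ "pharmaceuticals"

lemma pv_tok_cases (a : String) :
    a = "electronics" ∨ a = "gadgets" ∨ a = "appliances" ∨ a = "textiles" ∨
    a = "clothing" ∨ a = "fabrics" ∨ a = "machinery" ∨ a = "equipment" ∨
    a = "industrial" ∨ a = "food" ∨ a = "agriculture" ∨ a = "perishables" ∨
    a = "chemicals" ∨ a = "pharmaceuticals" ∨ pvNotTok a := by
  unfold pvNotTok
  by_cases h1 : a = "electronics"; · exact Or.inl h1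
  by_cases h2 : a = "gadgets"; · tauto
  by_cases h3 : a = "appliances"; · tauto
  by_cases h4 : a = "textiles"; · tauto
  by_cases h5 : a = "clothing"; · tauto
  by_cases h6 : a = "fabrics"; · tauto
  by_cases h7 : a = "machinery"; · tauto
  by_cases h8 : a = "equipment"; · tauto
  by_cases h9 : a = "industrial"; · tauto
  by_cases h10 : a = "food"; · tauto
  by_cases h11 : a = "agriculture"; · tauto
  by_cases h12 : a = "perishables"; · tauto
  by_cases h13 : a = "chemicals"; · tauto
  by_cases h14 : a = "pharmaceuticals"; · tauto
  tauto

lemma pvGroupsA_items : pvGroupsA.items =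
    [("electronics", ["electronics", "gadgets", "appliances"]),
     ("textiles", ["textiles", "clothing", "fabrics"]),
     ("machinery", ["machinery", "equipment", "industrial"]),
     ("food", ["food", "agriculture", "perishables"]),
     ("chemicals", ["chemicals", "pharmaceuticals", "industrial"])] := by decide

lemma pv_tags_notok (a : String) (h : pvNotTok a) : pvGroupTags a = PySem.Set.empty := by
  obtain ⟨m1, m2, m3, m4, m5, m6, m7, m8, m9, m10, m11, m12, m13, m14⟩ := h
  simp [pvGroupTags, List.contains_eq_mem, m1, m2, m3, m4, m5, m6, m7, m8, m9, m10,
    m11, m12, m13, m14]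

-- both sides are false when the second lowered string is no token
lemma pv_none_right (a b : String) (h : pvNotTok b) :
    (pvGroupsA.items.any (fun gt => gt.2.contains a && gt.2.contains b)) =
      (decide (0 < PySem.Set.len (PySem.Set.inter (pvGroupTags a) (pvGroupTags b)))) := by
  have hb := pv_tags_notok b h
  obtain ⟨m1, m2, m3, m4, m5, m6, m7, m8, m9, m10, m11, m12, m13, m14⟩ := h
  rw [hb, pvGroupsA_items]
  simp [List.contains_eq_mem, m1, m2, m3, m4, m5, m6, m7, m8, m9, m10, m11, m12, m13, m14,
    PySem.Set.inter, PySem.Set.len, PySem.Set.empty]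

-- both sides are false when the first lowered string is no token
lemma pv_none_left (a b : String) (h : pvNotTok a) :
    (pvGroupsA.items.any (fun gt => gt.2.contains a && gt.2.contains b)) =
      (decide (0 < PySem.Set.len (PySem.Set.inter (pvGroupTags a) (pvGroupTags b)))) := by
  have ha := pv_tags_notok a h
  obtain ⟨m1, m2, m3, m4, m5, m6, m7, m8, m9, m10, m11, m12, m13, m14⟩ := h
  rw [ha, pvGroupsA_items]
  simp [List.contains_eq_mem, m1, m2, m3, m4, m5, m6, m7, m8, m9, m10, m11, m12, m13, m14,
    PySem.Set.inter, PySem.Set.len, PySem.Set.empty]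

-- the two ports agree once the lowered strings are abstracted: case split on which token each is
lemma pv_core_eq (a b : String) :
    (pvGroupsA.items.any (fun gt => gt.2.contains a && gt.2.contains b)) =
      (decide (0 < PySem.Set.len (PySem.Set.inter (pvGroupTags a) (pvGroupTags b)))) := by
  rcases pv_tok_cases a with h|h|h|h|h|h|h|h|h|h|h|h|h|h|h <;>
    first
      | (subst h
         rcases pv_tok_cases b with h'|h'|h'|h'|h'|h'|h'|h'|h'|h'|h'|h'|h'|h'|h' <;>
           first
             | (subst h'; decide)
             | exact pv_none_right _ _ h')
      | exact pv_none_left _ _ h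

-- ===== VERDICT (by name: the statement is the Claim_ definition above) =====
theorem are_cargo_types_compatible_py_spec : Claim_equal_are_cargo_types_compatible_py := by
  intro type1 type2 _
  unfold Spec_are_cargo_types_compatible_py are_cargo_types_compatible_py are_cargo_types_compatible_py_alt
  exact pv_core_eq (PySem.Str.lower type1) (PySem.Str.lower type2)
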